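-- pv_equiv track=rewrite | github.com/AaronBakerBio/Needleman-Wunsch-Two-Matrix | align.py | parse_FASTA_file
-- ===== SOURCE A (Python) =====
-- def parse_FASTA_file(fasta_stream):
--     sequences = []
--     sequence = ''
--     for line in fasta_stream:
--         line = line.strip()
--         if line.startswith(">"):
--             if sequence:
--                 sequences.append(sequence)
--                 sequence = ''
--             if len(sequences) == 2:
--                 break
--         else:
--             sequence += line
--     if sequence and len(sequences) < 2:
--         sequences.append(sequence)
--     while len(sequences) < 2:
--         sequences.append('')
--     return sequences[0], sequences[1]
-- ===== SOURCE B (Python) =====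
-- def parse_FASTA_file(fasta_stream):
--     # Split the stripped lines into blocks delimited by header lines, then
--     # join each block, keep the non-empty ones and take the first two.
--     blocks = []
--     current = []
--     for line in fasta_stream:
--         line = line.strip()
--         if line.startswith('>'):
--             blocks.append(current)
--             current = []
--         else:
--             current.append(line)
--     blocks.append(current)
--     seqs = [s for s in (''.join(b) for b in blocks) if s][:2]
--     seqs += [''] * (2 - len(seqs))
--     return seqs[0], seqs[1]
-- ===== Notes on version B (the rewrite author's own statement) =====
-- stated objective: alternative
-- what changed: A's forward state machine (running string accumulator, reset-and-append on each header, early break after two sequences, conditional trailing append, while-loop padding) is replaced by a split-into-blocks decomposition: collect the lines of each header-delimited block, then join each block, filter out empty ones, take the first two and pad.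
import Mathlib
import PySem

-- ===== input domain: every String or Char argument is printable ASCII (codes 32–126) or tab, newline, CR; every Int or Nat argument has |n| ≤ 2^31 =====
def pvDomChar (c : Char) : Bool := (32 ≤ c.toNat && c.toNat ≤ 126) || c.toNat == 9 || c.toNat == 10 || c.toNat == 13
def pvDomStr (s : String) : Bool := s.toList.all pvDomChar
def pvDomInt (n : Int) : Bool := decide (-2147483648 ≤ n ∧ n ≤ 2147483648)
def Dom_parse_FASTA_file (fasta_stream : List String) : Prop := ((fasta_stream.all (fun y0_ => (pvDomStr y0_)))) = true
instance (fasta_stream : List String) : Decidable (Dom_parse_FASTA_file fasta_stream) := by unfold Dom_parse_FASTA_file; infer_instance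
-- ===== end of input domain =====

-- B splits the stripped lines into header-delimited blocks, then joins each block, filters the
-- empty ones, takes the first two and pads, replacing A's accumulator/reset/break/pad state machine;
-- objective: alternative, same cost.

-- ===== PORT A =====
-- A's for-loop: state = (sequences, sequence); returns the state at loop exit (break included)
def pvLoopA : List String → List String → String → List String × String
  | [], seqs, seq => (seqs, seq)
  | l :: rest, seqs, seq =>
    let line := PySem.Str.strip l
    if PySem.Str.startswith line ">" then
      let p := if seq ≠ "" then (seqs ++ [seq], "") else (seqs, seq)
      if p.1.length = 2 then p else pvLoopA rest p.1 p.2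
    else
      pvLoopA rest seqs (seq ++ line)

-- A's final `while len(sequences) < 2: sequences.append('')`
def pvPadA (seqs : List String) : List String :=
  if seqs.length < 2 then pvPadA (seqs ++ [""]) else seqs
termination_by 2 - seqs.length
decreasing_by simp [List.length_append]; omega

def parse_FASTA_file (fasta_stream : List String) : String × String :=
  let p := pvLoopA fasta_stream [] ""
  let seqs := if p.2 ≠ "" ∧ p.1.length < 2 then p.1 ++ [p.2] else p.1
  let seqs := pvPadA seqs
  -- sequences[0], sequences[1]: always in range (list padded to length ≥ 2), default never used
  ((PySem.List.pyGet? seqs 0).getD "", (PySem.List.pyGet? seqs 1).getD "")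

-- ===== PORT B =====
-- one step of B's loop: state = (completed blocks, lines of the block in progress)
def pvStepB (st : List (List String) × List String) (l : String) : List (List String) × List String :=
  let line := PySem.Str.strip l
  if PySem.Str.startswith line ">" then (st.1 ++ [st.2], [])
  else (st.1, st.2 ++ [line])

def parse_FASTA_file_alt (fasta_stream : List String) : String × String :=
  let st := fasta_stream.foldl pvStepB ([], [])
  let blocks := st.1 ++ [st.2]
  let seqs := ((blocks.map (PySem.Str.join "")).filter (fun s => s ≠ "")).take 2
  let seqs := seqs ++ List.replicate (2 - seqs.length) ""
  -- seqs[0], seqs[1]: always in range (list padded to length 2), default never used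
  ((PySem.List.pyGet? seqs 0).getD "", (PySem.List.pyGet? seqs 1).getD "")

-- ===== PRECONDITION & SPEC =====
def Spec_parse_FASTA_file (fasta_stream : List String) (out : String × String) : Prop := out = parse_FASTA_file_alt fasta_stream
instance (fasta_stream : List String) (out : String × String) : Decidable (Spec_parse_FASTA_file fasta_stream out) := by unfold Spec_parse_FASTA_file; infer_instance

-- ===== CLAIM (what is proved, stated in full; the proofs are below) =====
def Claim_equal_parse_FASTA_file : Prop := ∀ (fasta_stream : List String), Dom_parse_FASTA_file fasta_stream → Spec_parse_FASTA_file fasta_stream (parse_FASTA_file fasta_stream)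

-- ===== LEMMAS AND PROOFS =====
-- the joined blocks B computes, as a single right fold over the lines
def pvFastaStep (l : String) (runs : List String) : List String :=
  let line := PySem.Str.strip l
  if PySem.Str.startswith line ">" then "" :: runs
  else (line ++ runs.headD "") :: runs.tail

def pvRuns (lines : List String) : List String := lines.foldr pvFastaStep [""]

lemma join_empty_nil : PySem.Str.join "" [] = "" := by decide

lemma join_empty_cons (a : String) (l : List String) :
    PySem.Str.join "" (a :: l) = a ++ PySem.Str.join "" l := by
  cases l with
  | nil =>
    have h : (PySem.Str.join "" [a]).toList = (a ++ PySem.Str.join "" []).toList := by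
      simp [PySem.Str.toList_join, PySem.Chars.join_singleton, PySem.Chars.join_nil]
    exact String.toList_inj.mp h
  | cons b t =>
    have h : (PySem.Str.join "" (a :: b :: t)).toList = (a ++ PySem.Str.join "" (b :: t)).toList := by
      simp [PySem.Str.toList_join, PySem.Chars.join_cons_cons]
    exact String.toList_inj.mp h

lemma join_empty_snoc (xs : List String) (y : String) :
    PySem.Str.join "" (xs ++ [y]) = PySem.Str.join "" xs ++ y := by
  induction xs with
  | nil => simp [join_empty_cons, join_empty_nil]
  | cons a t ih => simp [join_empty_cons, ih, String.append_assoc]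

lemma pvRuns_ne_nil (lines : List String) : pvRuns lines ≠ [] := by
  cases lines with
  | nil => simp [pvRuns]
  | cons l rest =>
    simp only [pvRuns, List.foldr, pvFastaStep]
    split <;> simp

-- B's fold state, finalised and joined, is exactly the run list (here generalised over the
-- starting accumulator: finished blocks `acc` and the block in progress `cur`)
lemma pvStepB_runs_gen (fs : List String) : ∀ (acc : List (List String)) (cur : List String),
    (((fs.foldl pvStepB (acc, cur)).1 ++ [(fs.foldl pvStepB (acc, cur)).2]).map (PySem.Str.join ""))
      = acc.map (PySem.Str.join "")
        ++ ((PySem.Str.join "" cur ++ (pvRuns fs).headD "") :: (pvRuns fs).tail) := by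
  induction fs with
  | nil =>
    intro acc cur
    simp [pvRuns]
  | cons l rest ih =>
    intro acc cur
    simp only [List.foldl]
    by_cases hh : PySem.Str.startswith (PySem.Str.strip l) ">" = true
    · have hstep : pvStepB (acc, cur) l = (acc ++ [cur], []) := by
        simp only [pvStepB, hh, reduceIte]
      have hruns : pvRuns (l :: rest) = "" :: pvRuns rest := by
        simp only [pvRuns, List.foldr, pvFastaStep, hh]; rfl
      rw [hstep, ih, hruns]
      have hr := pvRuns_ne_nil rest
      cases hc : pvRuns rest with
      | nil => exact absurd hc hr
      | cons a t => simp [join_empty_nil]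
    · simp only [Bool.not_eq_true] at hh
      have hstep : pvStepB (acc, cur) l = (acc, cur ++ [PySem.Str.strip l]) := by
        simp only [pvStepB, hh, Bool.false_eq_true, reduceIte]
      have hruns : pvRuns (l :: rest)
          = (PySem.Str.strip l ++ (pvRuns rest).headD "") :: (pvRuns rest).tail := by
        simp only [pvRuns, List.foldr, pvFastaStep, hh, Bool.false_eq_true, if_false]
      rw [hstep, ih, hruns]
      simp [join_empty_snoc, String.append_assoc]

lemma pvStepB_runs (fs : List String) :
    (((fs.foldl pvStepB ([], [])).1 ++ [(fs.foldl pvStepB ([], [])).2]).map (PySem.Str.join ""))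
      = pvRuns fs := by
  rw [pvStepB_runs_gen fs [] []]
  have hr := pvRuns_ne_nil fs
  cases hc : pvRuns fs with
  | nil => exact absurd hc hr
  | cons a t => simp [join_empty_nil]

-- B's run list for the suffix `lines`, with `seq` prepended to the first run, filtered to nonempty
def pvG (seq : String) (lines : List String) : List String :=
  ((seq ++ (pvRuns lines).headD "") :: (pvRuns lines).tail).filter (fun s => s ≠ "")

lemma pvG_empty (lines : List String) : pvG "" lines = (pvRuns lines).filter (fun s => s ≠ "") := by
  have h := pvRuns_ne_nil lines
  cases hr : pvRuns lines with
  | nil => exact absurd hr h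
  | cons a t => simp [pvG, hr]

lemma pvG_nonheader (l : String) (rest : List String) (seq : String)
    (hh : PySem.Str.startswith (PySem.Str.strip l) ">" = false) :
    pvG seq (l :: rest) = pvG (seq ++ PySem.Str.strip l) rest := by
  have hr := pvRuns_ne_nil rest
  have hruns : pvRuns (l :: rest) = (PySem.Str.strip l ++ (pvRuns rest).headD "") :: (pvRuns rest).tail := by
    simp only [pvRuns, List.foldr, pvFastaStep, hh]; rfl
  cases hc : pvRuns rest with
  | nil => exact absurd hc hr
  | cons a t => simp [pvG, hruns, hc, String.append_assoc]

lemma pvG_header (l : String) (rest : List String) (seq : String)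
    (hh : PySem.Str.startswith (PySem.Str.strip l) ">" = true) :
    pvG seq (l :: rest) = (if seq ≠ "" then [seq] else []) ++ (pvRuns rest).filter (fun s => s ≠ "") := by
  have hruns : pvRuns (l :: rest) = "" :: pvRuns rest := by
    simp only [pvRuns, List.foldr, pvFastaStep, hh]; rfl
  have he : seq ++ "" = seq := by simp
  simp only [pvG, hruns, List.headD, List.tail, he, List.filter_cons]
  by_cases hs : seq = "" <;> simp [hs]

-- the loop invariant: A's loop followed by its trailing append equals the first two
-- nonempty runs of B's run list (with `seq` prefixed to the first run), after `seqs`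
lemma pvLoopA_final (lines : List String) : ∀ (seqs : List String) (seq : String), seqs.length ≤ 1 →
    (if (pvLoopA lines seqs seq).2 ≠ "" ∧ (pvLoopA lines seqs seq).1.length < 2
      then (pvLoopA lines seqs seq).1 ++ [(pvLoopA lines seqs seq).2]
      else (pvLoopA lines seqs seq).1)
    = (seqs ++ pvG seq lines).take 2 := by
  induction lines with
  | nil =>
    intro seqs seq h
    simp only [pvLoopA, pvG, pvRuns, List.foldr, List.headD, List.tail]
    have he : seq ++ "" = seq := by simp
    rw [he]
    by_cases hs : seq = ""
    · subst hs
      simp [List.take_of_length_le, (by omega : seqs.length ≤ 2)]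
    · simp only [ne_eq, hs, not_false_eq_true, true_and, List.filter_cons, List.filter_nil]
      rw [if_pos (by omega), if_pos (by simp)]
      rw [List.take_of_length_le (by simp; omega)]
  | cons l rest ih =>
    intro seqs seq h
    simp only [pvLoopA]
    by_cases hh : PySem.Str.startswith (PySem.Str.strip l) ">" = true
    · simp only [hh, if_true]
      by_cases hs : seq = ""
      · subst hs
        simp only [ne_eq, not_true_eq_false, if_false]
        rw [if_neg (show ¬ seqs.length = 2 from by omega)]
        rw [ih seqs "" h, pvG_header l rest "" hh, pvG_empty]
        simp
      · simp only [ne_eq, hs, not_false_eq_true, if_true]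
        rw [pvG_header l rest seq hh]
        simp only [ne_eq, hs, not_false_eq_true, if_true]
        by_cases hl : seqs.length = 1
        · rw [if_pos (show (seqs ++ [seq]).length = 2 from by simp [hl])]
          simp only [not_true_eq_false, false_and, if_false]
          rw [show seqs ++ ([seq] ++ List.filter (fun s => decide ¬s = "") (pvRuns rest))
                = (seqs ++ [seq]) ++ List.filter (fun s => decide ¬s = "") (pvRuns rest) from by simp]
          rw [List.take_left' (by simp [hl])]
        · have hs0 : seqs = [] := List.length_eq_zero_iff.mp (by omega)
          subst hs0
          simp only [List.nil_append]
          rw [if_neg (show ¬([seq].length = 2) from by simp)]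
          rw [ih [seq] "" (by simp), pvG_empty]
    · simp only [Bool.not_eq_true] at hh
      simp only [hh, Bool.false_eq_true, if_false]
      rw [ih seqs (seq ++ PySem.Str.strip l) h, pvG_nonheader l rest seq hh]

-- A's pad-to-2 while-loop is appending the missing number of empty strings
lemma pvPadA_eq (s : List String) : pvPadA s = s ++ List.replicate (2 - s.length) "" := by
  induction s using pvPadA.induct with
  | case1 s hlt ih =>
    rw [pvPadA, if_pos hlt, ih]
    rw [List.append_assoc, show 2 - s.length = (2 - (s ++ [""]).length) + 1 from by simp; omega,
        List.replicate_succ]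
    simp
  | case2 s hlt =>
    rw [pvPadA, if_neg hlt, show 2 - s.length = 0 from by omega]
    simp

-- ===== VERDICT (by name: the statement is the Claim_ definition above) =====
theorem parse_FASTA_file_spec : Claim_equal_parse_FASTA_file := by
  intro fs _
  unfold Spec_parse_FASTA_file parse_FASTA_file parse_FASTA_file_alt
  have key := pvLoopA_final fs [] "" (by simp)
  rw [pvG_empty] at key
  simp only [List.nil_append] at key
  dsimp only
  rw [pvStepB_runs fs]
  rw [key, pvPadA_eq]
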